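-- pv_equiv track=rewrite | github.com/liangruichen/BlogsCrl | BlogsCrl.py | ctr2
-- ===== SOURCE A (Python) =====
-- def ctr2(ct, st):
--     st1 = "</thead>"
--     l = ct.find(st)
--     r = ct.find(st1, l + 1)
--     ntf = "</th>"
--     tf = ""
--     if ct.find("<th style=\"text-align: right;\">", l) != -1 and ct.find("<th style=\"text-align: right;\">", l) < r:
--         tf = "<th style=\"text-align: right;\">"
--     elif ct.find("<th style=\"text-align: left;\">", l) != -1 and ct.find("<th style=\"text-align: left;\">", l) < r:
--         tf = "<th style=\"text-align: left;\">"
--     else: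
--         tf = "<th style=\"text-align: center;\">"
--
--     w = l
--     ans = "| "
--     cnt = 0
--     while ct.find(tf, w + 1) != -1 and ct.find(tf, w + 1) < r:
--         w = ct.find(tf, w + 1)
--         mes = ""
--         sl = w + len(tf)
--         while ct[sl] != '<' or ct[sl + 1] != '/':
--             mes += ct[sl]
--             sl += 1
--         ans += mes + ' | '
--         cnt += 1
--
--     r = ct.find("<tbody>", l)
--     rpt = ""
--     for i in range(l):
--         rpt += ct[i]
--     rpt += ans + '\n'
--     esp = '----------'
--     if tf.find("right") != -1:
--         esp += ':'
--     elif tf.find("left") != -1: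
--         esp = ':' + esp
--     else:
--         esp = ':' + esp + ':'
--     for i in range(cnt):
--         rpt += '| ' + esp + ' '
--     rpt += '|'
--     for i in range(r + 7, len(ct)):
--         rpt += ct[i]
--     return rpt
-- ===== SOURCE B (Python) =====
-- def ctr2(ct, st):
--     l = ct.find(st)
--     r = ct.find("</thead>", l + 1)
--     right = "<th style=\"text-align: right;\">"
--     left = "<th style=\"text-align: left;\">"
--     center = "<th style=\"text-align: center;\">"
--     pr = ct.find(right, l)
--     pl = ct.find(left, l)
--     if pr != -1 and pr < r:
--         tf, esp = right, '----------:'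
--     elif pl != -1 and pl < r:
--         tf, esp = left, ':----------'
--     else:
--         tf, esp = center, ':----------:'
--     cells = []
--     w = ct.find(tf, l + 1)
--     while w != -1 and w < r:
--         s = w + len(tf)
--         e = ct.find('</', s)
--         cells.append(ct[s:e])
--         w = ct.find(tf, w + 1)
--     rb = ct.find("<tbody>", l)
--     header = '| ' + ''.join(c + ' | ' for c in cells)
--     sep = ''.join('| ' + esp + ' ' for _ in cells) + '|'
--     prefix = ct[:l] if l != -1 else ''
--     return prefix + header + '\n' + sep + ct[rb + 7:]
-- ===== Notes on version B (the rewrite author's own statement) =====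
-- stated objective: simpler
-- what changed: B harvests the header cells into a list by jumping with find('</') instead of A's character-by-character inner scan, builds the header and separator rows with join over that list instead of A's counter-driven accumulation loops, and takes the prefix/suffix with slices instead of A's per-character copy loops.
import Mathlib
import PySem

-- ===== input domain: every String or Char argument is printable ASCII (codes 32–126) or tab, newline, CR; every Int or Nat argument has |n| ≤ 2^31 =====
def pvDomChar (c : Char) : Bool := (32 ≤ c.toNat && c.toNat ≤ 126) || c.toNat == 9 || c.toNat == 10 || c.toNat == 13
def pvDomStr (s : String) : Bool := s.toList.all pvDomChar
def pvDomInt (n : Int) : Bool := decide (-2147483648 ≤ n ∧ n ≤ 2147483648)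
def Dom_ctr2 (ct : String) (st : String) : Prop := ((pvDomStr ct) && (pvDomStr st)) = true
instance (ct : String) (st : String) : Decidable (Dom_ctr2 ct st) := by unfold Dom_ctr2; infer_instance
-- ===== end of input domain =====

-- B replaces A's character-by-character cell scanning and per-character copy loops by
-- harvesting the cells into a list with find('</') jumps, building the header/separator
-- rows with join over that list, and slicing the prefix/suffix (objective: simpler).

-- two facts the ports cite in their own termination proofs (kept above the ports for that reason)
theorem pvFindFrom_neg_one_le (cs sub : List Char) (k : Int) :
    -1 ≤ PySem.Chars.findFrom cs sub k none := by
  simp only [PySem.Chars.findFrom]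
  set s0 : Int := (if k < 0 then if k + (cs.length : Int) < 0 then 0 else k + (cs.length : Int) else k) with hs0
  have h1 := PySem.Chars.neg_one_le_find (List.drop s0.toNat (List.take ((cs.length : Int)).toNat cs)) sub
  split_ifs <;> omega

theorem pvFindFrom_ge (cs sub : List Char) (k : Int) (hk : 0 ≤ k)
    (h : PySem.Chars.findFrom cs sub k none ≠ -1) : k ≤ PySem.Chars.findFrom cs sub k none := by
  revert h
  simp only [PySem.Chars.findFrom]
  set s0 : Int := (if k < 0 then if k + (cs.length : Int) < 0 then 0 else k + (cs.length : Int) else k) with hs0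
  have h1 := PySem.Chars.neg_one_le_find (List.drop s0.toNat (List.take ((cs.length : Int)).toNat cs)) sub
  split_ifs <;> intro h <;> omega

-- ===== PORT A =====
-- inner loop: while ct[sl] != '<' or ct[sl+1] != '/': mes += ct[sl]; sl += 1
-- (the `none` arms are where Python's ct[sl] / ct[sl+1] would raise IndexError)
def ctr2MesLoop (cs : List Char) (sl : Int) (mes : List Char) : List Char :=
  match h : PySem.List.pyGet? cs sl with
  | none => mes
  | some c =>
    if c = '<' then
      match PySem.List.pyGet? cs (sl + 1) with
      | none => mes
      | some c2 => if c2 = '/' then mes else ctr2MesLoop cs (sl + 1) (mes ++ [c])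
    else ctr2MesLoop cs (sl + 1) (mes ++ [c])
termination_by (cs.length - sl).toNat
decreasing_by
  all_goals
    have hn : ¬ (PySem.List.pyGet? cs sl = none) := by simp [h]
    rw [PySem.List.pyGet?_eq_none_iff] at hn
    unfold PySem.Raise.InRange at hn
    omega

-- outer loop: while ct.find(tf, w+1) != -1 and ct.find(tf, w+1) < r: …
def ctr2CellLoop (cs tf : List Char) (r : Int) (w : Int) (ans : List Char) (cnt : Nat) :
    List Char × Nat :=
  let w' := PySem.Chars.findFrom cs tf (w + 1)
  if h : ¬ w' = -1 ∧ w' < r then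
    ctr2CellLoop cs tf r w' (ans ++ ctr2MesLoop cs (w' + tf.length) [] ++ [' ', '|', ' ']) (cnt + 1)
  else (ans, cnt)
termination_by (r - w).toNat
decreasing_by
  have hm1 := pvFindFrom_neg_one_le cs tf (w + 1)
  have := h.2
  by_cases hw : -1 ≤ w
  · have hge := pvFindFrom_ge cs tf (w + 1) (by omega) h.1
    omega
  · omega

def ctr2Core (cs stl : List Char) : List Char :=
  let st1 := "</thead>".toList
  let l := PySem.Chars.find cs stl
  let r := PySem.Chars.findFrom cs st1 (l + 1)
  let tfR := "<th style=\"text-align: right;\">".toList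
  let tfL := "<th style=\"text-align: left;\">".toList
  let tfC := "<th style=\"text-align: center;\">".toList
  let tf := if ¬ PySem.Chars.findFrom cs tfR l = -1 ∧ PySem.Chars.findFrom cs tfR l < r then tfR
            else if ¬ PySem.Chars.findFrom cs tfL l = -1 ∧ PySem.Chars.findFrom cs tfL l < r then tfL
            else tfC
  let p := ctr2CellLoop cs tf r l "| ".toList 0
  let r2 := PySem.Chars.findFrom cs "<tbody>".toList l
  let rpt := (PySem.List.pyRange 0 l 1).foldl (fun acc i => acc ++ [PySem.List.pyGetD cs i ' ']) []
  let rpt := rpt ++ p.1 ++ ['\n']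
  let esp := "----------".toList
  let esp := if ¬ PySem.Chars.find tf "right".toList = -1 then esp ++ [':']
             else if ¬ PySem.Chars.find tf "left".toList = -1 then ':' :: esp
             else ':' :: (esp ++ [':'])
  let rpt := (PySem.List.pyRange 0 (p.2 : Int) 1).foldl (fun acc _ => acc ++ ("| ".toList ++ esp ++ [' '])) rpt
  let rpt := rpt ++ ['|']
  (PySem.List.pyRange (r2 + 7) (cs.length : Int) 1).foldl (fun acc i => acc ++ [PySem.List.pyGetD cs i ' ']) rpt

def ctr2 (ct : String) (st : String) : String := String.ofList (ctr2Core ct.toList st.toList)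

-- ===== PORT B =====
-- while w != -1 and w < r: s = w+len(tf); e = ct.find('</', s); cells.append(ct[s:e]); w = ct.find(tf, w+1)
def ctr2AltCells (cs tf : List Char) (r : Int) (w : Int) : List (List Char) :=
  if h : ¬ w = -1 ∧ w < r then
    PySem.List.slice cs (some (w + tf.length))
        (some (PySem.Chars.findFrom cs "</".toList (w + tf.length)))
      :: ctr2AltCells cs tf r (PySem.Chars.findFrom cs tf (w + 1))
  else []
termination_by (if w = -1 then 0 else (r - w).toNat + 1)
decreasing_by
  simp only [if_neg h.1]
  have hm1 := pvFindFrom_neg_one_le cs tf (w + 1)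
  by_cases h2 : PySem.Chars.findFrom cs tf (w + 1) = -1
  · simp [h2]
  · simp only [if_neg h2]
    have := h.2
    by_cases hw : -1 ≤ w
    · have hge := pvFindFrom_ge cs tf (w + 1) (by omega) h2
      omega
    · omega

def ctr2AltCore (cs stl : List Char) : List Char :=
  let l := PySem.Chars.find cs stl
  let r := PySem.Chars.findFrom cs "</thead>".toList (l + 1)
  let pr := PySem.Chars.findFrom cs "<th style=\"text-align: right;\">".toList l
  let pl := PySem.Chars.findFrom cs "<th style=\"text-align: left;\">".toList l
  let q := if ¬ pr = -1 ∧ pr < r then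
             ("<th style=\"text-align: right;\">".toList, "----------:".toList)
           else if ¬ pl = -1 ∧ pl < r then
             ("<th style=\"text-align: left;\">".toList, ":----------".toList)
           else ("<th style=\"text-align: center;\">".toList, ":----------:".toList)
  let cells := ctr2AltCells cs q.1 r (PySem.Chars.findFrom cs q.1 (l + 1))
  let rb := PySem.Chars.findFrom cs "<tbody>".toList l
  let header := "| ".toList ++ (cells.map (· ++ " | ".toList)).flatten
  let sep := (cells.map (fun _ => ("| ".toList ++ q.2 ++ [' ']))).flatten ++ ['|']
  let pre := if l = -1 then [] else PySem.List.slice cs none (some l)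
  pre ++ header ++ ['\n'] ++ sep ++ PySem.List.slice cs (some (rb + 7)) none

def ctr2_alt (ct : String) (st : String) : String := String.ofList (ctr2AltCore ct.toList st.toList)

-- ===== PRECONDITION & SPEC =====
def Spec_ctr2 (ct : String) (st : String) (out : String) : Prop := out = ctr2_alt ct st
instance (ct : String) (st : String) (out : String) : Decidable (Spec_ctr2 ct st out) := by unfold Spec_ctr2; infer_instance

-- ===== CLAIM (what is proved, stated in full; the proofs are below) =====
def Claim_equal_ctr2 : Prop := ∀ (ct : String) (st : String), Dom_ctr2 ct st → Spec_ctr2 ct st (ctr2 ct st)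

-- ===== LEMMAS AND PROOFS =====

-- findFrom basics not in the book: start past the end gives -1; spec repackaged for an Int start
theorem pvFindFrom_eq_neg_one_of_gt (cs sub : List Char) (k : Int) (hk : (cs.length : Int) < k) :
    PySem.Chars.findFrom cs sub k none = -1 := by
  simp only [PySem.Chars.findFrom]
  set s0 : Int := (if k < 0 then if k + (cs.length : Int) < 0 then 0 else k + (cs.length : Int) else k) with hs0
  have hs : s0 = k := by simp only [hs0]; split_ifs <;> omega
  rw [if_pos (by omega)]

theorem pvFindFrom_spec (cs sub : List Char) (k : Int) (hk : 0 ≤ k)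
    (h : PySem.Chars.findFrom cs sub k none ≠ -1) :
    k ≤ PySem.Chars.findFrom cs sub k none ∧
      sub <+: cs.drop (PySem.Chars.findFrom cs sub k none).toNat ∧
      ∀ i : Nat, k ≤ (i : Int) → i < (PySem.Chars.findFrom cs sub k none).toNat →
        ¬ sub <+: cs.drop i := by
  by_cases hlen : k ≤ (cs.length : Int)
  · have hcast : k = ((k.toNat : Nat) : Int) := by omega
    rw [hcast] at h ⊢
    have hsp := PySem.Chars.findFrom_natCast_spec cs sub k.toNat (by omega) h
    exact ⟨hsp.1, hsp.2.1, fun i hi1 hi2 => hsp.2.2 i (by omega) hi2⟩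
  · exact absurd (pvFindFrom_eq_neg_one_of_gt cs sub k (by omega)) h

-- step equations for A's inner scan
theorem pvMesStop (cs : List Char) (sl : Int) (mes : List Char)
    (h1 : PySem.List.pyGet? cs sl = some '<') (h2 : PySem.List.pyGet? cs (sl + 1) = some '/') :
    ctr2MesLoop cs sl mes = mes := by
  rw [ctr2MesLoop]
  split
  · rfl
  · rename_i c heq
    rw [h1] at heq
    obtain rfl : c = '<' := by injection heq with h; exact h.symm
    rw [if_pos rfl]
    split
    · rfl
    · rename_i c2 heq2
      rw [h2] at heq2
      obtain rfl : c2 = '/' := by injection heq2 with h; exact h.symm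
      rw [if_pos rfl]

theorem pvMesStepLt (cs : List Char) (sl : Int) (mes : List Char) (c2 : Char)
    (h1 : PySem.List.pyGet? cs sl = some '<') (h2 : PySem.List.pyGet? cs (sl + 1) = some c2)
    (hc2 : c2 ≠ '/') :
    ctr2MesLoop cs sl mes = ctr2MesLoop cs (sl + 1) (mes ++ ['<']) := by
  rw [ctr2MesLoop]
  split
  · rename_i heq
    rw [h1] at heq
    exact absurd heq (by simp)
  · rename_i c heq
    rw [h1] at heq
    obtain rfl : c = '<' := by injection heq with h; exact h.symm
    rw [if_pos rfl]
    split
    · rename_i heq2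
      rw [h2] at heq2
      exact absurd heq2 (by simp)
    · rename_i c2' heq2
      rw [h2] at heq2
      obtain rfl : c2' = c2 := by injection heq2 with h; exact h.symm
      rw [if_neg hc2]

theorem pvMesStepOther (cs : List Char) (sl : Int) (mes : List Char) (c : Char)
    (h1 : PySem.List.pyGet? cs sl = some c) (hc : c ≠ '<') :
    ctr2MesLoop cs sl mes = ctr2MesLoop cs (sl + 1) (mes ++ [c]) := by
  rw [ctr2MesLoop]
  split
  · rename_i heq
    rw [h1] at heq
    exact absurd heq (by simp)
  · rename_i c' heq
    rw [h1] at heq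
    obtain rfl : c' = c := by injection heq with h; exact h.symm
    rw [if_neg hc]

-- A's inner scan collects exactly the characters up to the first "</" at or after s
theorem pvMes_eq (cs : List Char) (e : Nat) (he : "</".toList <+: cs.drop e) :
    ∀ s : Nat, s ≤ e → (∀ i : Nat, s ≤ i → i < e → ¬ "</".toList <+: cs.drop i) →
    ∀ mes, ctr2MesLoop cs (s : Int) mes = mes ++ ((cs.drop s).take (e - s)) := by
  have he2 : e + 2 ≤ cs.length := by
    have := he.length_le
    simp at this
    omega
  have hce : cs[e]? = some '<' := by
    obtain ⟨t, ht⟩ := he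
    have : (cs.drop e)[0]? = cs[e + 0]? := List.getElem?_drop
    rw [← ht] at this
    simpa using this.symm
  have hce2 : cs[e + 1]? = some '/' := by
    obtain ⟨t, ht⟩ := he
    have : (cs.drop e)[1]? = cs[e + 1]? := List.getElem?_drop
    rw [← ht] at this
    simpa using this.symm
  suffices H : ∀ n s, e - s = n → s ≤ e → (∀ i : Nat, s ≤ i → i < e → ¬ "</".toList <+: cs.drop i) →
      ∀ mes, ctr2MesLoop cs (s : Int) mes = mes ++ ((cs.drop s).take (e - s)) by
    exact fun s hs hmin mes => H (e - s) s rfl hs hmin mes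
  intro n
  induction n with
  | zero =>
    intro s hn hs hmin mes
    have hse : s = e := by omega
    subst hse
    have h1 : PySem.List.pyGet? cs (s : Int) = some '<' := by
      rw [PySem.List.pyGet?_natCast]; exact hce
    have h2 : PySem.List.pyGet? cs ((s : Int) + 1) = some '/' := by
      have hc : ((s : Int) + 1) = ((s + 1 : Nat) : Int) := by push_cast; ring
      rw [hc, PySem.List.pyGet?_natCast]; exact hce2
    rw [pvMesStop cs (s : Int) mes h1 h2]
    simp
  | succ n ih =>
    intro s hn hs hmin mes
    have hslen : s < cs.length := by omega
    have h1 : PySem.List.pyGet? cs (s : Int) = some cs[s] := by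
      rw [PySem.List.pyGet?_natCast]; exact List.getElem?_eq_getElem hslen
    have hcast : ((s : Int) + 1) = ((s + 1 : Nat) : Int) := by push_cast; ring
    have hdrop : cs.drop s = cs[s] :: cs.drop (s + 1) := List.drop_eq_getElem_cons hslen
    have htake : (cs.drop s).take (e - s) = cs[s] :: (cs.drop (s + 1)).take (e - (s + 1)) := by
      have h3 : e - s = (e - (s + 1)) + 1 := by omega
      rw [hdrop, h3, List.take_succ_cons]
    have hrec := ih (s + 1) (by omega) (by omega) (fun i hi1 hi2 => hmin i (by omega) hi2)
    by_cases hc : cs[s] = '<'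
    · have hs1len : s + 1 < cs.length := by omega
      have h2 : PySem.List.pyGet? cs ((s : Int) + 1) = some cs[s + 1] := by
        rw [hcast, PySem.List.pyGet?_natCast]; exact List.getElem?_eq_getElem hs1len
      have hc2 : cs[s + 1] ≠ '/' := by
        intro hc2
        apply hmin s le_rfl (by omega)
        refine ⟨cs.drop (s + 2), ?_⟩
        rw [hdrop, List.drop_eq_getElem_cons hs1len]
        simp [hc, hc2]
      rw [hc] at h1
      rw [pvMesStepLt cs (s : Int) mes cs[s + 1] h1 h2 hc2, hcast, hrec (mes ++ ['<']), htake]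
      simp [hc]
    · rw [pvMesStepOther cs (s : Int) mes cs[s] h1 hc, hcast, hrec (mes ++ [cs[s]]), htake]
      simp

-- slices as take/drop on in-range indices
theorem pvSlice_take (cs : List Char) (l : Int) (h0 : 0 ≤ l) (hl : l ≤ (cs.length : Int)) :
    PySem.List.slice cs none (some l) = cs.take l.toNat := by
  simp only [PySem.List.slice, PySem.List.clampIdx]
  rw [if_neg (by omega), min_eq_left (by omega)]
  simp

theorem pvSlice_drop (cs : List Char) (a : Int) (h0 : 0 ≤ a) :
    PySem.List.slice cs (some a) none = cs.drop a.toNat := by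
  simp only [PySem.List.slice, PySem.List.clampIdx]
  rw [if_neg (by omega)]
  by_cases h : a.toNat ≤ cs.length
  · rw [min_eq_left h]
    exact List.take_of_length_le (by simp)
  · rw [min_eq_right (by omega)]
    simp
    omega

theorem pvSlice_take_drop (cs : List Char) (s e : Nat) (hs : s ≤ cs.length) (he : e ≤ cs.length) :
    PySem.List.slice cs (some (s : Int)) (some (e : Int)) = (cs.drop s).take (e - s) := by
  simp only [PySem.List.slice, PySem.List.clampIdx]
  rw [if_neg (by omega), if_neg (by omega), min_eq_left (by omega), min_eq_left (by omega)]
  simp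

-- the two per-character copy loops of A are take/drop
theorem pvMap_getD_range (cs : List Char) (d : Char) (n : Nat) (hn : n ≤ cs.length) :
    (List.range n).map (fun k => cs.getD k d) = cs.take n := by
  apply List.ext_getElem
  · simp; omega
  · intro i h1 h2
    simp only [List.getElem_map, List.getElem_range, List.getElem_take]
    rw [List.getD_eq_getElem cs d (by simp at h1; omega)]

theorem pvMap_getD_range_drop (cs : List Char) (d : Char) (m : Nat) :
    (List.range (cs.length - m)).map (fun k => cs.getD (m + k) d) = cs.drop m := by
  apply List.ext_getElem
  · simp
  · intro i h1 h2
    simp only [List.getElem_map, List.getElem_range, List.getElem_drop]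
    rw [List.getD_eq_getElem cs d (by simp at h1; omega)]

theorem pvPrefix_eq (cs : List Char) (l : Int) (hm1 : -1 ≤ l) (hl : l ≤ (cs.length : Int)) :
    (PySem.List.pyRange 0 l 1).foldl (fun acc i => acc ++ [PySem.List.pyGetD cs i ' ']) [] =
      (if l = -1 then [] else PySem.List.slice cs none (some l)) := by
  rw [PySem.List.foldl_append_singleton_eq_map]
  by_cases hneg : l = -1
  · subst hneg
    rfl
  · rw [if_neg hneg]
    have hcast : l = ((l.toNat : Nat) : Int) := by omega
    rw [hcast, PySem.List.pyRange_zero_natCast, List.map_map,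
      pvSlice_take cs ((l.toNat : Nat) : Int) (by omega) (by rw [← hcast]; exact hl)]
    simp only [List.nil_append, Function.comp_def, PySem.List.pyGetD_natCast, Int.toNat_natCast]
    exact pvMap_getD_range cs ' ' l.toNat (by omega)

theorem pvSuffix_eq (cs : List Char) (a : Int) (h0 : 0 ≤ a) (init : List Char) :
    (PySem.List.pyRange a (cs.length : Int) 1).foldl
        (fun acc i => acc ++ [PySem.List.pyGetD cs i ' ']) init =
      init ++ cs.drop a.toNat := by
  rw [PySem.List.foldl_append_singleton_eq_map,
    PySem.List.pyRange_of_pos a (cs.length : Int) (by norm_num)]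
  congr 1
  by_cases hlt : a < (cs.length : Int)
  · rw [if_pos hlt]
    have h1 : (((cs.length : Int) - a + 1 - 1) / 1).toNat = cs.length - a.toNat := by
      rw [show (cs.length : Int) - a + 1 - 1 = (cs.length : Int) - a by ring, Int.ediv_one]
      omega
    rw [h1, List.map_map, ← pvMap_getD_range_drop cs ' ' a.toNat]
    apply List.map_congr_left
    intro k hk
    have hck : a + 1 * (k : Int) = ((a.toNat + k : Nat) : Int) := by push_cast; omega
    simp only [Function.comp_def, hck, PySem.List.pyGetD_natCast]
  · rw [if_neg hlt]
    simp only [List.range_zero, List.map_nil]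
    symm
    rw [List.drop_eq_nil_iff]
    omega

theorem pvFoldl_const {α : Type} (xs : List α) (u : List Char) :
    ∀ init, xs.foldl (fun acc _ => acc ++ u) init = init ++ (List.replicate xs.length u).flatten := by
  induction xs with
  | nil => simp
  | cons x xs ih =>
    intro init
    simp only [List.foldl_cons, List.length_cons, List.replicate_succ, List.flatten_cons, ih]
    simp [List.append_assoc]

-- the two cell loops walk the same chain of tag occurrences and agree cell by cell
theorem pvCells_eq (cs tf : List Char) (r : Int)
    (Htf2 : 2 ≤ tf.length) (HtfK : ∀ k, ∀ _ : k < tf.length, 0 < k → tf[k] ≠ '<')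
    (Hr : ¬ r = -1 → 0 ≤ r ∧ "</thead>".toList <+: cs.drop r.toNat) :
    ∀ (n : Nat) (w : Int), -1 ≤ w → (r - w).toNat < n → ∀ (ans : List Char) (cnt : Nat),
      ctr2CellLoop cs tf r w ans cnt =
        (ans ++ ((ctr2AltCells cs tf r (PySem.Chars.findFrom cs tf (w + 1))).map
              (· ++ [' ', '|', ' '])).flatten,
         cnt + (ctr2AltCells cs tf r (PySem.Chars.findFrom cs tf (w + 1))).length) := by
  intro n
  induction n with
  | zero => intro w hw hm; omega
  | succ n ih =>
    intro w hw hm ans cnt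
    rw [ctr2CellLoop, ctr2AltCells]
    by_cases hcond : ¬ (PySem.Chars.findFrom cs tf (w + 1)) = -1 ∧ (PySem.Chars.findFrom cs tf (w + 1)) < r
    · rw [dif_pos hcond, dif_pos hcond]
      have hge : w + 1 ≤ (PySem.Chars.findFrom cs tf (w + 1)) := pvFindFrom_ge cs tf (w + 1) (by omega) hcond.1
      have hlt : (PySem.Chars.findFrom cs tf (w + 1)) < r := hcond.2
      have hspec := pvFindFrom_spec cs tf (w + 1) (by omega) hcond.1
      have hocc : tf <+: cs.drop ((PySem.Chars.findFrom cs tf (w + 1))).toNat := hspec.2.1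
      have htl : ((PySem.Chars.findFrom cs tf (w + 1))).toNat + tf.length ≤ cs.length := by
        have h5 := hocc.length_le
        rw [List.length_drop] at h5
        omega
      have hrne : ¬ r = -1 := by omega
      obtain ⟨hr0, hrocc⟩ := Hr hrne
      have hrlen : r.toNat + 8 ≤ cs.length := by
        have h5 := hrocc.length_le
        rw [List.length_drop] at h5
        have h6 : ("</thead>".toList).length = 8 := by decide
        omega
      -- r cannot point into the matched tag: tf has '<' only at its head
      have hsep : (((PySem.Chars.findFrom cs tf (w + 1))).toNat : Int) + tf.length ≤ r := by
        by_contra hcon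
        push Not at hcon
        have hkpos : 0 < r.toNat - ((PySem.Chars.findFrom cs tf (w + 1))).toNat := by omega
        have hklt : r.toNat - ((PySem.Chars.findFrom cs tf (w + 1))).toNat < tf.length := by omega
        obtain ⟨t1, ht1⟩ := hocc
        obtain ⟨t2, ht2⟩ := hrocc
        have e1 : cs[r.toNat]? = some '<' := by
          have h0 : (cs.drop r.toNat)[0]? = cs[r.toNat + 0]? := List.getElem?_drop
          rw [← ht2] at h0
          simpa using h0.symm
        have h0 : (cs.drop ((PySem.Chars.findFrom cs tf (w + 1))).toNat)[r.toNat - ((PySem.Chars.findFrom cs tf (w + 1))).toNat]? = cs[((PySem.Chars.findFrom cs tf (w + 1))).toNat + (r.toNat - ((PySem.Chars.findFrom cs tf (w + 1))).toNat)]? :=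
          List.getElem?_drop
        have h1 : (tf ++ t1)[r.toNat - ((PySem.Chars.findFrom cs tf (w + 1))).toNat]? = some tf[r.toNat - ((PySem.Chars.findFrom cs tf (w + 1))).toNat] := by
          rw [List.getElem?_append_left hklt]
          exact List.getElem?_eq_getElem hklt
        have e2 : cs[((PySem.Chars.findFrom cs tf (w + 1))).toNat + (r.toNat - ((PySem.Chars.findFrom cs tf (w + 1))).toNat)]? = some tf[r.toNat - ((PySem.Chars.findFrom cs tf (w + 1))).toNat] := by
          rw [← h0, ← ht1, h1]
        have e4 : r.toNat = ((PySem.Chars.findFrom cs tf (w + 1))).toNat + (r.toNat - ((PySem.Chars.findFrom cs tf (w + 1))).toNat) := by omega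
        rw [e4, e2] at e1
        exact HtfK _ hklt hkpos (Option.some.inj e1)
      have hs_le : ((PySem.Chars.findFrom cs tf (w + 1))).toNat + tf.length ≤ cs.length := htl
      have hclose : "</".toList <+: cs.drop r.toNat := by
        obtain ⟨t2, ht2⟩ := hrocc
        exact ⟨"thead>".toList ++ t2, by rw [← ht2]; rfl⟩
      have hinfix : "</".toList <:+: cs.drop (((PySem.Chars.findFrom cs tf (w + 1))).toNat + tf.length) := by
        have hdd : (cs.drop (((PySem.Chars.findFrom cs tf (w + 1))).toNat + tf.length)).drop (r.toNat - (((PySem.Chars.findFrom cs tf (w + 1))).toNat + tf.length)) =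
            cs.drop r.toNat := by
          rw [List.drop_drop]
          congr 1
          omega
        refine List.IsInfix.trans ?_
          (List.drop_suffix (r.toNat - (((PySem.Chars.findFrom cs tf (w + 1))).toNat + tf.length)) (cs.drop (((PySem.Chars.findFrom cs tf (w + 1))).toNat + tf.length))).isInfix
        rw [hdd]
        exact hclose.isInfix
      have hex : ¬ PySem.Chars.findFrom cs "</".toList ((((PySem.Chars.findFrom cs tf (w + 1))).toNat + tf.length : Nat) : Int) none = -1 := by
        rw [PySem.Chars.findFrom_natCast_eq_neg_one_iff cs "</".toList (((PySem.Chars.findFrom cs tf (w + 1))).toNat + tf.length) hs_le]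
        exact fun h => h hinfix
      have hespec := pvFindFrom_spec cs "</".toList ((((PySem.Chars.findFrom cs tf (w + 1))).toNat + tf.length : Nat) : Int) (by positivity) hex
      have he0 : (0 : Int) ≤ PySem.Chars.findFrom cs "</".toList ((((PySem.Chars.findFrom cs tf (w + 1))).toNat + tf.length : Nat) : Int) none :=
        le_trans (by positivity) hespec.1
      have he_le : (PySem.Chars.findFrom cs "</".toList ((((PySem.Chars.findFrom cs tf (w + 1))).toNat + tf.length : Nat) : Int) none).toNat ≤ cs.length := by
        have h5 := hespec.2.1.length_le
        rw [List.length_drop] at h5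
        have h6 : ("</".toList).length = 2 := by decide
        omega
      have hmes := pvMes_eq cs (PySem.Chars.findFrom cs "</".toList ((((PySem.Chars.findFrom cs tf (w + 1))).toNat + tf.length : Nat) : Int) none).toNat
        hespec.2.1 (((PySem.Chars.findFrom cs tf (w + 1))).toNat + tf.length) (by omega)
        (fun i hi1 hi2 => hespec.2.2 i (by omega) hi2) []
      have hwcast : (PySem.Chars.findFrom cs tf (w + 1)) + (tf.length : Int) = ((((PySem.Chars.findFrom cs tf (w + 1))).toNat + tf.length : Nat) : Int) := by
        push_cast
        omega
      have hecast : PySem.Chars.findFrom cs "</".toList ((((PySem.Chars.findFrom cs tf (w + 1))).toNat + tf.length : Nat) : Int) none =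
          (((PySem.Chars.findFrom cs "</".toList ((((PySem.Chars.findFrom cs tf (w + 1))).toNat + tf.length : Nat) : Int) none).toNat : Nat) : Int) := by
        omega
      have hcell : ctr2MesLoop cs ((PySem.Chars.findFrom cs tf (w + 1)) + (tf.length : Int)) [] =
          PySem.List.slice cs (some ((PySem.Chars.findFrom cs tf (w + 1)) + (tf.length : Int)))
            (some (PySem.Chars.findFrom cs "</".toList ((PySem.Chars.findFrom cs tf (w + 1)) + (tf.length : Int)) none)) := by
        rw [hwcast, hmes, hecast,
          pvSlice_take_drop cs (((PySem.Chars.findFrom cs tf (w + 1))).toNat + tf.length) _ hs_le he_le]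
        simp
        omega
      have hmeas : (r - (PySem.Chars.findFrom cs tf (w + 1))).toNat < n := by omega
      rw [ih (PySem.Chars.findFrom cs tf (w + 1)) (by omega) hmeas, hcell]
      simp only [Prod.mk.injEq, List.map_cons, List.flatten_cons, List.length_cons]
      constructor
      · simp [List.append_assoc]
      · omega
    · rw [dif_neg hcond, dif_neg hcond]
      simp

theorem ctr2_core_eq (cs stl : List Char) : ctr2Core cs stl = ctr2AltCore cs stl := by
  have hl0 : -1 ≤ PySem.Chars.find cs stl := PySem.Chars.neg_one_le_find cs stl
  have hlle : PySem.Chars.find cs stl ≤ (cs.length : Int) := PySem.Chars.find_le_length cs stl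
  have hHr : ¬ (PySem.Chars.findFrom cs "</thead>".toList (PySem.Chars.find cs stl + 1)) = -1 → 0 ≤ (PySem.Chars.findFrom cs "</thead>".toList (PySem.Chars.find cs stl + 1)) ∧ "</thead>".toList <+: cs.drop (PySem.Chars.findFrom cs "</thead>".toList (PySem.Chars.find cs stl + 1)).toNat := by
    intro hne
    have hsp := pvFindFrom_spec cs "</thead>".toList (PySem.Chars.find cs stl + 1) (by omega) hne
    exact ⟨by omega, hsp.2.1⟩
  have hlenR : ∀ n : Nat, (PySem.List.pyRange 0 (n : Int) 1).length = n := fun n => by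
    rw [PySem.List.pyRange_zero_natCast]
    simp
  simp only [ctr2Core, ctr2AltCore]
  by_cases h1 : ¬ PySem.Chars.findFrom cs "<th style=\"text-align: right;\">".toList (PySem.Chars.find cs stl) = -1 ∧ PySem.Chars.findFrom cs "<th style=\"text-align: right;\">".toList (PySem.Chars.find cs stl) < (PySem.Chars.findFrom cs "</thead>".toList (PySem.Chars.find cs stl + 1))
  · rw [if_pos h1, if_pos h1]
    rw [pvCells_eq cs "<th style=\"text-align: right;\">".toList (PySem.Chars.findFrom cs "</thead>".toList (PySem.Chars.find cs stl + 1)) (by decide) (by decide) hHr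
      (((PySem.Chars.findFrom cs "</thead>".toList (PySem.Chars.find cs stl + 1)) - PySem.Chars.find cs stl).toNat + 1) (PySem.Chars.find cs stl) (PySem.Chars.neg_one_le_find cs stl) (by omega) "| ".toList 0]
    rw [if_pos (show ¬ PySem.Chars.find "<th style=\"text-align: right;\">".toList "right".toList = -1 by decide)]
    rw [pvPrefix_eq cs (PySem.Chars.find cs stl) hl0 hlle]
    rw [pvFoldl_const, List.map_const']
    rw [pvSuffix_eq cs (PySem.Chars.findFrom cs "<tbody>".toList (PySem.Chars.find cs stl) + 7) (by have := pvFindFrom_neg_one_le cs "<tbody>".toList (PySem.Chars.find cs stl); omega)]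
    rw [pvSlice_drop cs (PySem.Chars.findFrom cs "<tbody>".toList (PySem.Chars.find cs stl) + 7) (by have := pvFindFrom_neg_one_le cs "<tbody>".toList (PySem.Chars.find cs stl); omega)]
    simp [List.append_assoc, hlenR]
  · rw [if_neg h1, if_neg h1]
    by_cases h2 : ¬ PySem.Chars.findFrom cs "<th style=\"text-align: left;\">".toList (PySem.Chars.find cs stl) = -1 ∧ PySem.Chars.findFrom cs "<th style=\"text-align: left;\">".toList (PySem.Chars.find cs stl) < (PySem.Chars.findFrom cs "</thead>".toList (PySem.Chars.find cs stl + 1))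
    · rw [if_pos h2, if_pos h2]
      rw [pvCells_eq cs "<th style=\"text-align: left;\">".toList (PySem.Chars.findFrom cs "</thead>".toList (PySem.Chars.find cs stl + 1)) (by decide) (by decide) hHr
        (((PySem.Chars.findFrom cs "</thead>".toList (PySem.Chars.find cs stl + 1)) - PySem.Chars.find cs stl).toNat + 1) (PySem.Chars.find cs stl) (PySem.Chars.neg_one_le_find cs stl) (by omega) "| ".toList 0]
      rw [if_neg (show ¬ (¬ PySem.Chars.find "<th style=\"text-align: left;\">".toList "right".toList = -1) by decide), if_pos (show ¬ PySem.Chars.find "<th style=\"text-align: left;\">".toList "left".toList = -1 by decide)]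
      rw [pvPrefix_eq cs (PySem.Chars.find cs stl) hl0 hlle]
      rw [pvFoldl_const, List.map_const']
      rw [pvSuffix_eq cs (PySem.Chars.findFrom cs "<tbody>".toList (PySem.Chars.find cs stl) + 7) (by have := pvFindFrom_neg_one_le cs "<tbody>".toList (PySem.Chars.find cs stl); omega)]
      rw [pvSlice_drop cs (PySem.Chars.findFrom cs "<tbody>".toList (PySem.Chars.find cs stl) + 7) (by have := pvFindFrom_neg_one_le cs "<tbody>".toList (PySem.Chars.find cs stl); omega)]
      simp [List.append_assoc, hlenR]
    · rw [if_neg h2, if_neg h2]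
      rw [pvCells_eq cs "<th style=\"text-align: center;\">".toList (PySem.Chars.findFrom cs "</thead>".toList (PySem.Chars.find cs stl + 1)) (by decide) (by decide) hHr
        (((PySem.Chars.findFrom cs "</thead>".toList (PySem.Chars.find cs stl + 1)) - PySem.Chars.find cs stl).toNat + 1) (PySem.Chars.find cs stl) (PySem.Chars.neg_one_le_find cs stl) (by omega) "| ".toList 0]
      rw [if_neg (show ¬ (¬ PySem.Chars.find "<th style=\"text-align: center;\">".toList "right".toList = -1) by decide), if_neg (show ¬ (¬ PySem.Chars.find "<th style=\"text-align: center;\">".toList "left".toList = -1) by decide)]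
      rw [pvPrefix_eq cs (PySem.Chars.find cs stl) hl0 hlle]
      rw [pvFoldl_const, List.map_const']
      rw [pvSuffix_eq cs (PySem.Chars.findFrom cs "<tbody>".toList (PySem.Chars.find cs stl) + 7) (by have := pvFindFrom_neg_one_le cs "<tbody>".toList (PySem.Chars.find cs stl); omega)]
      rw [pvSlice_drop cs (PySem.Chars.findFrom cs "<tbody>".toList (PySem.Chars.find cs stl) + 7) (by have := pvFindFrom_neg_one_le cs "<tbody>".toList (PySem.Chars.find cs stl); omega)]
      simp [List.append_assoc, hlenR]

-- ===== VERDICT (by name: the statement is the Claim_ definition above) =====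
theorem ctr2_spec : Claim_equal_ctr2 := by
  intro ct st _
  unfold Spec_ctr2 ctr2 ctr2_alt
  rw [ctr2_core_eq]
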